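-- pv_equiv track=rewrite | github.com/Aasim-Qureshi/Real-Estate | src/scripts/estate/formFiller.py | distribute_records
-- ===== SOURCE A (Python) =====
-- def distribute_records(records, num_tabs):
--     """Distribute records as evenly as possible across tabs"""
--     total = len(records)
--     base_count = total // num_tabs
--     remainder = total % num_tabs
--
--     distributed = []
--     start_idx = 0
--
--     for i in range(num_tabs):
--         # First 'remainder' tabs get one extra record
--         count = base_count + (1 if i < remainder else 0)
--         end_idx = start_idx + count
--         distributed.append(records[start_idx:end_idx])
--         start_idx = end_idx
--
--     return distributed
-- ===== SOURCE B (Python) =====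
-- def distribute_records(records, num_tabs):
--     """Distribute records as evenly as possible across tabs.
--
--     Self-balancing greedy chop: reverse the records once so the next chunk
--     can be popped off the end in O(1) per record, then for each tab bite off
--     the first ceil(len(rest)/tabs_left) remaining records; no base/remainder
--     or index arithmetic is needed, the chunk sizes rebalance themselves.
--     """
--     distributed = []
--     rest = records[::-1]
--     tabs_left = num_tabs
--     while tabs_left > 0:
--         k = -(-len(rest) // tabs_left)
--         distributed.append([rest.pop() for _ in range(k)])
--         tabs_left -= 1
--     return distributed
-- ===== Notes on version B (the rewrite author's own statement) =====
-- stated objective: alternative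
-- what changed: Replaces A's precomputed base_count/remainder plus running start_idx over the fixed list by a self-balancing greedy chop: reverse once, then repeatedly pop the first ceil(len(rest)/tabs_left) remaining records off for the next tab, with no base/remainder or index arithmetic at all.
-- outside the precondition, e.g. on distribute_records([1, 2], 0): A raises ZeroDivisionError, B returns []
import Mathlib
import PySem

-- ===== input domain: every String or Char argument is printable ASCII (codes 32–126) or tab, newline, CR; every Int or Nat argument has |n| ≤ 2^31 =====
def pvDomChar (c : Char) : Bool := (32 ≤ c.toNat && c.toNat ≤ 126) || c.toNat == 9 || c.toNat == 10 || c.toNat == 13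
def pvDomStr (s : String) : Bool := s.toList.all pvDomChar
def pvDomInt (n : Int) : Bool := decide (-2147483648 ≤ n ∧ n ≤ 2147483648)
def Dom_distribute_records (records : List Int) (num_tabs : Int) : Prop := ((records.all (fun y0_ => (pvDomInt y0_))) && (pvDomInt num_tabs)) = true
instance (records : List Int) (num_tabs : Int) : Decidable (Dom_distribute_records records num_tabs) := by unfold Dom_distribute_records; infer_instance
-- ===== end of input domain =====

-- B replaces A's base/remainder + running start_idx by a self-balancing greedy chop (take ceil(len(rest)/tabs_left) off the front each step); alternative decomposition, same output.


-- ===== PORT A =====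
def distribute_records (records : List Int) (num_tabs : Int) : List (List Int) :=
  let total : Int := PySem.List.len records
  let base_count : Int := PySem.Int.floordiv total num_tabs
  let remainder : Int := PySem.Int.mod total num_tabs
  ((PySem.List.pyRange 0 num_tabs 1).foldl
    (fun (st : List (List Int) × Int) i =>
      let count := base_count + (if i < remainder then 1 else 0)
      let end_idx := st.2 + count
      (st.1 ++ [PySem.List.slice records (some st.2) (some end_idx)], end_idx))
    ([], 0)).1

-- ===== PORT B =====
-- one `rest.pop()` of the chunk comprehension: append the popped last element
-- (the `none` branch is unreachable: each chunk size is at most len(rest), so pop() never raises)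
def popStep (st : List Int × List Int) (_i : Int) : List Int × List Int :=
  match PySem.List.pop? st.2 (-1) with
  | some (v, r) => (st.1 ++ [v], r)
  | none => st

-- the while-loop of Source B: state (distributed, rest); the countdown `tabs_left = num_tabs, …, 1`
-- runs num_tabs.toNat times, so it is ported as structural recursion on that counter
def distChopGo (distributed : List (List Int)) (rest : List Int) (tabs_left : Nat) :
    List (List Int) :=
  match tabs_left with
  | 0 => distributed
  | t + 1 =>
    let k : Int := -(PySem.Int.floordiv (-(PySem.List.len rest)) ((t : Int) + 1))
    let pc := (PySem.List.pyRange 0 k 1).foldl popStep ([], rest)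
    distChopGo (distributed ++ [pc.1]) pc.2 t

def distribute_records_alt (records : List Int) (num_tabs : Int) : List (List Int) :=
  distChopGo [] records.reverse num_tabs.toNat

-- ===== PRECONDITION & SPEC =====
-- Pre_ excludes exactly num_tabs = 0, where Python A raises ZeroDivisionError.
def Pre_distribute_records (records : List Int) (num_tabs : Int) : Prop := num_tabs ≠ 0
instance (records : List Int) (num_tabs : Int) : Decidable (Pre_distribute_records records num_tabs) := by unfold Pre_distribute_records; infer_instance
def pvWitness_distribute_records : List Int × Int := ([1, 2, 3, 4, 5], 3)

def Spec_distribute_records (records : List Int) (num_tabs : Int) (out : List (List Int)) : Prop := out = distribute_records_alt records num_tabs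
instance (records : List Int) (num_tabs : Int) (out : List (List Int)) : Decidable (Spec_distribute_records records num_tabs out) := by unfold Spec_distribute_records; infer_instance

-- ===== CLAIM (what is proved, stated in full; the proofs are below) =====
def Claim_equal_distribute_records : Prop := ∀ (records : List Int) (num_tabs : Int), Dom_distribute_records records num_tabs → Pre_distribute_records records num_tabs → Spec_distribute_records records num_tabs (distribute_records records num_tabs)

-- ===== LEMMAS AND PROOFS =====

-- A's loop state after n iterations: the slices so far, and start_idx = n*base + min n rem in closed form.
theorem loop_closed_form (records : List Int) (base rem : Int) (hrem : 0 ≤ rem) (n : Nat) :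
    (PySem.List.pyRange 0 (n : Int) 1).foldl
      (fun (st : List (List Int) × Int) i =>
        (st.1 ++ [PySem.List.slice records (some st.2)
            (some (st.2 + (base + (if i < rem then 1 else 0))))],
          st.2 + (base + (if i < rem then 1 else 0))))
      ([], 0)
    = ((List.range n).map (fun (k : Nat) =>
          PySem.List.slice records (some ((k : Int) * base + min (k : Int) rem))
            (some (((k : Int) + 1) * base + min ((k : Int) + 1) rem))),
        (n : Int) * base + min (n : Int) rem) := by
  have key : ∀ i : Int, i * base + min i rem + (base + (if i < rem then 1 else 0))
      = (i + 1) * base + min (i + 1) rem := by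
    intro i; rw [add_one_mul]; split_ifs <;> omega
  induction n with
  | zero => simp [PySem.List.pyRange_one_eq_nil]; omega
  | succ n ih =>
    rw [show ((n + 1 : Nat) : Int) = (n : Int) + 1 by push_cast; ring,
        PySem.List.pyRange_one_succ_right (by positivity), List.foldl_append, ih]
    simp only [List.foldl_cons, List.foldl_nil, List.range_succ, List.map_append, List.map_cons,
      List.map_nil, Prod.mk.injEq]
    rw [key (n : Int)]
    exact ⟨rfl, rfl⟩

-- a slice of a dropped list is a slice of the original, shifted
theorem slice_drop_shift (xs : List Int) (K : Nat) (a b : Int) (ha : 0 ≤ a) (hb : 0 ≤ b) :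
    PySem.List.slice (xs.drop K) (some a) (some b)
      = PySem.List.slice xs (some ((K : Int) + a)) (some ((K : Int) + b)) := by
  rw [PySem.List.slice_toNat _ ha hb, PySem.List.slice_toNat _ (by omega) (by omega),
    List.drop_drop]
  congr 1
  · omega
  · congr 1; omega

-- popping the last element of a reversed list yields its head
theorem pop_last (ys : List Int) (y : Int) : PySem.List.pop? (ys ++ [y]) (-1) = some (y, ys) := by
  simp [PySem.List.pop?, PySem.List.pyIdx?, List.eraseIdx_append_of_length_le (le_refl ys.length)]

-- l.length pops off the reversed tail take the first l.length elements, in order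
theorem popFold (l : List Int) : ∀ (acc xs : List Int), l.length ≤ xs.length →
    l.foldl popStep (acc, xs.reverse)
      = (acc ++ xs.take l.length, (xs.drop l.length).reverse) := by
  induction l with
  | nil => intro acc xs _; simp
  | cons a l ih =>
    intro acc xs h
    cases xs with
    | nil => simp at h
    | cons x xt =>
      simp only [List.foldl_cons]
      have hstep : popStep (acc, (x :: xt).reverse) a = (acc ++ [x], xt.reverse) := by
        simp [popStep, List.reverse_cons, pop_last]
      rw [hstep, ih (acc ++ [x]) xt (by simpa using h)]
      simp

-- B's loop in closed form: the same cut points k*base + min k rem as A reaches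
theorem chop_closed (m : Nat) : ∀ (acc : List (List Int)) (rest : List Int),
    distChopGo acc rest.reverse m
      = acc ++ (List.range m).map (fun (k : Nat) =>
          PySem.List.slice rest
            (some ((k : Int) * PySem.Int.floordiv (rest.length : Int) (m : Int)
                    + min (k : Int) (PySem.Int.mod (rest.length : Int) (m : Int))))
            (some (((k : Int) + 1) * PySem.Int.floordiv (rest.length : Int) (m : Int)
                    + min ((k : Int) + 1) (PySem.Int.mod (rest.length : Int) (m : Int))))) := by
  induction m with
  | zero => intro acc rest; simp [distChopGo]
  | succ m ih =>
    intro acc rest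
    have hcast : ((m + 1 : Nat) : Int) = (m : Int) + 1 := by push_cast; ring
    rw [hcast]
    have hmpos : (0 : Int) < (m : Int) + 1 := by positivity
    set L : Int := (rest.length : Int) with hL
    have hL0 : 0 ≤ L := by positivity
    set q : Int := PySem.Int.floordiv L ((m : Int) + 1) with hq
    set r : Int := PySem.Int.mod L ((m : Int) + 1) with hr
    have hqr : q * ((m : Int) + 1) + r = L := PySem.Int.floordiv_mul_add_mod L ((m : Int) + 1)
    have hr0 : 0 ≤ r := PySem.Int.mod_nonneg L hmpos
    have hrn : r < (m : Int) + 1 := PySem.Int.mod_lt L hmpos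
    have hq0 : 0 ≤ q := by nlinarith
    set k0 : Int := q + min 1 r with hk0
    -- the chunk size taken this step is ceil(L / (m+1)) = q + min 1 r
    have hk : -(PySem.Int.floordiv (-(PySem.List.len rest.reverse)) ((m : Int) + 1)) = k0 := by
      have hlen : PySem.List.len rest.reverse = L := by simp [PySem.List.len, hL]
      rw [hlen, PySem.Int.neg_floordiv_neg_eq_iff_of_pos hmpos]
      constructor <;> rcases (by omega : r ≤ 0 ∨ 0 < r) with h | h
      · have h1 : k0 = q := by omega
        rw [h1]; nlinarith
      · have h1 : k0 = q + 1 := by omega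
        rw [h1]; nlinarith
      · have h1 : k0 = q := by omega
        rw [h1]; nlinarith
      · have h1 : k0 = q + 1 := by omega
        rw [h1]; nlinarith
    have hk00 : 0 ≤ k0 := by omega
    have hk0L : k0 ≤ L := by
      rcases (by omega : r ≤ 0 ∨ 0 < r) with h | h
      · have h1 : k0 = q := by omega
        rw [h1]; nlinarith
      · have h1 : k0 = q + 1 := by omega
        rw [h1]; nlinarith
    simp only [distChopGo]
    rw [hk]
    have hrl : (PySem.List.pyRange 0 k0 1).length = k0.toNat := by
      rw [PySem.List.pyRange_one]; simp
    have hfold := popFold (PySem.List.pyRange 0 k0 1) [] rest (by rw [hrl]; omega)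
    rw [hrl] at hfold
    rw [hfold]
    simp only [List.nil_append]
    rw [ih]
    have hL' : ((rest.drop k0.toNat).length : Int) = L - k0 := by
      simp only [List.length_drop]; omega
    rw [List.append_assoc]
    congr 1
    rw [List.range_succ_eq_map]
    simp only [List.map_cons, List.map_map, List.singleton_append, Nat.cast_zero]
    congr 1
    · -- head chunk: cut points 0 and k0 select exactly the first k0 records
      have h0 : (0 : Int) * q + min 0 r = 0 := by omega
      have h1 : ((0 : Int) + 1) * q + min (0 + 1) r = k0 := by omega
      rw [h0, h1, PySem.List.slice_zero_start, PySem.List.slice_to _ hk00]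
    · -- tail chunks: shift every cut point of the remaining list by k0
      apply List.map_congr_left
      intro j hj
      have hm' : (0 : Int) < (m : Int) := by
        have := List.mem_range.mp hj; omega
      simp only [Function.comp]
      rw [hL']
      set q' : Int := PySem.Int.floordiv (L - k0) (m : Int) with hq'
      set r' : Int := PySem.Int.mod (L - k0) (m : Int) with hr'
      have hqq : q' = q := by
        rw [hq', PySem.Int.floordiv_eq_iff_of_pos hm']
        rcases (by omega : r ≤ 0 ∨ 0 < r) with h | h
        · have h1 : k0 = q := by omega
          rw [h1]; constructor <;> nlinarith
        · have h1 : k0 = q + 1 := by omega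
          rw [h1]; constructor <;> nlinarith
      have hrr : r' = r - min 1 r := by
        have h2 := PySem.Int.floordiv_mul_add_mod (L - k0) (m : Int)
        rw [← hq', ← hr', hqq] at h2
        nlinarith
      rw [hqq, hrr]
      have hjq : 0 ≤ (j : Int) * q := mul_nonneg (by positivity) hq0
      have hjq1 : 0 ≤ ((j : Int) + 1) * q := mul_nonneg (by positivity) hq0
      rw [slice_drop_shift rest k0.toNat _ _ (by omega) (by omega),
        Int.toNat_of_nonneg hk00]
      have harg : ∀ t : Int, 0 ≤ t → 0 ≤ t * q →
          k0 + (t * q + min t (r - min 1 r)) = (t + 1) * q + min (t + 1) r := by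
        intro t ht htq
        have hh : (t + 1) * q = t * q + q := by ring
        rw [hh]
        generalize t * q = u at htq ⊢
        omega
      push_cast
      rw [harg (j : Int) (by positivity) hjq,
        harg ((j : Int) + 1) (by positivity) hjq1]

-- ===== VERDICT (by name: the statement is the Claim_ definition above) =====
theorem distribute_records_spec : Claim_equal_distribute_records := by
  intro records num_tabs _ hpre
  unfold Spec_distribute_records distribute_records distribute_records_alt
  dsimp only
  rcases lt_trichotomy num_tabs 0 with hneg | hz | hpos
  · rw [PySem.List.pyRange_one_eq_nil (by omega)]
    have : num_tabs.toNat = 0 := by omega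
    rw [this]
    simp [distChopGo]
  · exact absurd hz hpre
  · obtain ⟨m, hm⟩ : ∃ m : Nat, num_tabs = (m : Int) :=
      ⟨num_tabs.toNat, (Int.toNat_of_nonneg hpos.le).symm⟩
    subst hm
    have hrem0 : 0 ≤ PySem.Int.mod (PySem.List.len records) (m : Int) :=
      PySem.Int.mod_nonneg _ hpos
    rw [loop_closed_form records _ _ hrem0 m, Int.toNat_natCast, chop_closed m [] records]
    simp only [List.nil_append]
    have hlen : PySem.List.len records = (records.length : Int) := by simp [PySem.List.len]
    rw [hlen]
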